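-- pv_equiv track=rewrite | github.com/nosheal/water-tracker | aqua_cli.py | parse_model_and_nums
-- ===== SOURCE A (Python) =====
-- MODEL_LABELS = {
--     "haiku": ("Haiku", "~8-20B"),
--     "sonnet": ("Sonnet", "~70B MoE"),
--     "opus": ("Opus 4.5", "~200B+"),
-- }
--
-- INFRA_LABELS = {
--     "google_cloud": "Google Cloud (TPU)",
--     "aws_east": "AWS US East (Trainium)",
--     "industry_avg": "Industry Average",
-- }
--
-- DEFAULT_INFRA = "google_cloud"
--
-- def parse_model_and_nums(args):
--     """Parse args into model name and list of numbers."""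
--     model = "opus"
--     nums = []
--     infra = DEFAULT_INFRA
--     for a in args:
--         if a in MODEL_LABELS: model = a
--         elif a in INFRA_LABELS: infra = a
--         else:
--             try: nums.append(int(a))
--             except ValueError: pass
--     return model, infra, nums
-- ===== SOURCE B (Python) =====
-- MODEL_LABELS = {
--     "haiku": ("Haiku", "~8-20B"),
--     "sonnet": ("Sonnet", "~70B MoE"),
--     "opus": ("Opus 4.5", "~200B+"),
-- }
--
-- INFRA_LABELS = {
--     "google_cloud": "Google Cloud (TPU)",
--     "aws_east": "AWS US East (Trainium)",
--     "industry_avg": "Industry Average",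
-- }
--
-- DEFAULT_INFRA = "google_cloud"
--
--
-- def _to_int(a):
--     try:
--         return int(a)
--     except ValueError:
--         return None
--
--
-- def parse_model_and_nums(args):
--     """Parse args into model name and list of numbers (three separate passes)."""
--     models = [a for a in args if a in MODEL_LABELS]
--     infras = [a for a in args if a in INFRA_LABELS]
--     nums = [n for n in
--             (_to_int(a) for a in args
--              if a not in MODEL_LABELS and a not in INFRA_LABELS)
--             if n is not None]
--     model = models[-1] if models else "opus"
--     infra = infras[-1] if infras else DEFAULT_INFRA
--     return model, infra, nums
-- ===== Notes on version B (the rewrite author's own statement) =====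
-- stated objective: alternative
-- what changed: Replaces the single interleaved loop carrying three pieces of mutable state by three independent filtered passes: model = last model-label arg (default 'opus'), infra = last infra-label arg (default DEFAULT_INFRA), nums = ints parsed from the remaining args.
import Mathlib
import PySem

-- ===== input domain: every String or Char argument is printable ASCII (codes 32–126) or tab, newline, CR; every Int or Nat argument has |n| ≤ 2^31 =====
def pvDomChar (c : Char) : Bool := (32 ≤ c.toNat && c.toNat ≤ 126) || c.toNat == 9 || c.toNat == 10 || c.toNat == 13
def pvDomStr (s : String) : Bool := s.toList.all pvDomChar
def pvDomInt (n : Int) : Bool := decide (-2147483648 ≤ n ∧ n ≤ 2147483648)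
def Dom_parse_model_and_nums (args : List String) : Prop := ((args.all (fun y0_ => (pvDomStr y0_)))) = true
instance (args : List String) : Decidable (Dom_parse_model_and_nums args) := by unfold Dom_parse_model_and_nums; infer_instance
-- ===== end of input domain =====

-- B replaces A's single interleaved loop with three independent filtered passes (alternative decomposition, same cost).

-- ===== PORT A =====
-- keys of MODEL_LABELS / INFRA_LABELS (dict membership tests only keys)
def pvModelKeys : List String := ["haiku", "sonnet", "opus"]
def pvInfraKeys : List String := ["google_cloud", "aws_east", "industry_avg"]

def parse_model_and_nums (args : List String) : String × String × List Int :=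
  args.foldl
    (fun (st : String × String × List Int) a =>
      if pvModelKeys.contains a then (a, st.2.1, st.2.2)
      else if pvInfraKeys.contains a then (st.1, a, st.2.2)
      else
        match PySem.Int.ofStr? a with
        | some n => (st.1, st.2.1, st.2.2 ++ [n])
        | none => st)
    ("opus", "google_cloud", [])

-- ===== PORT B =====
def pvLastOr (xs : List String) (d : String) : String := xs.getLast?.getD d

def parse_model_and_nums_alt (args : List String) : String × String × List Int :=
  let models := args.filter (fun a => pvModelKeys.contains a)
  let infras := args.filter (fun a => pvInfraKeys.contains a)
  let nums := args.filterMap (fun a =>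
    if pvModelKeys.contains a || pvInfraKeys.contains a then none
    else PySem.Int.ofStr? a)
  (pvLastOr models "opus", pvLastOr infras "google_cloud", nums)

-- ===== PRECONDITION & SPEC =====
def Spec_parse_model_and_nums (args : List String) (out : String × String × List Int) : Prop := out = parse_model_and_nums_alt args
instance (args : List String) (out : String × String × List Int) : Decidable (Spec_parse_model_and_nums args out) := by unfold Spec_parse_model_and_nums; infer_instance

-- ===== CLAIM (what is proved, stated in full; the proofs are below) =====
def Claim_equal_parse_model_and_nums : Prop := ∀ (args : List String), Dom_parse_model_and_nums args → Spec_parse_model_and_nums args (parse_model_and_nums args)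

-- ===== LEMMAS AND PROOFS =====

theorem pvLastOr_cons (a d : String) (l : List String) :
    pvLastOr (a :: l) d = pvLastOr l a := by
  unfold pvLastOr
  cases l with
  | nil => simp
  | cons b t => simp [List.getLast?_cons]

theorem pv_model_not_infra (a : String) (hm : pvModelKeys.contains a = true) :
    pvInfraKeys.contains a = false := by
  simp [pvModelKeys] at hm
  rcases hm with h | h | h <;> subst h <;> decide

theorem pv_fold_general (args : List String) (model infra : String) (nums : List Int) :
    args.foldl
      (fun (st : String × String × List Int) a =>
        if pvModelKeys.contains a then (a, st.2.1, st.2.2)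
        else if pvInfraKeys.contains a then (st.1, a, st.2.2)
        else
          match PySem.Int.ofStr? a with
          | some n => (st.1, st.2.1, st.2.2 ++ [n])
          | none => st)
      (model, infra, nums)
    = (pvLastOr (args.filter (fun a => pvModelKeys.contains a)) model,
       pvLastOr (args.filter (fun a => pvInfraKeys.contains a)) infra,
       nums ++ args.filterMap (fun a =>
         if pvModelKeys.contains a || pvInfraKeys.contains a then none
         else PySem.Int.ofStr? a)) := by
  induction args generalizing model infra nums with
  | nil => simp [pvLastOr]
  | cons a rest ih =>
    rw [List.foldl_cons]
    by_cases hm : pvModelKeys.contains a = true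
    · have hi := pv_model_not_infra a hm
      have hm' : a ∈ pvModelKeys := by simpa using hm
      have hi' : a ∉ pvInfraKeys := by simpa using hi
      rw [if_pos hm, ih]
      simp [hm', hi', pvLastOr_cons]
    · by_cases hi : pvInfraKeys.contains a = true
      · have hm' : a ∉ pvModelKeys := by simpa using hm
        have hi' : a ∈ pvInfraKeys := by simpa using hi
        rw [if_neg hm, if_pos hi, ih]
        simp [hm', hi', pvLastOr_cons]
      · have hm' : a ∉ pvModelKeys := by simpa using hm
        have hi' : a ∉ pvInfraKeys := by simpa using hi
        rw [if_neg hm, if_neg hi]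
        cases h : PySem.Int.ofStr? a with
        | none =>
          simp only [h]
          rw [ih]
          simp [hm', hi', h]
        | some n =>
          simp only [h]
          rw [ih]
          simp [hm', hi', h]

-- ===== VERDICT (by name: the statement is the Claim_ definition above) =====
theorem parse_model_and_nums_spec : Claim_equal_parse_model_and_nums := by
  intro args _
  unfold Spec_parse_model_and_nums parse_model_and_nums parse_model_and_nums_alt
  exact pv_fold_general args "opus" "google_cloud" []
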